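-- pv_equiv track=rewrite | github.com/innewiadro/Codewars | kata_level7/Latin_squares/Latin_squares.py | make_latin_square
-- ===== SOURCE A (Python) =====
-- def make_latin_square(n):
--     square = [[0] * n for _ in range(n)]
--
--     for i in range(n):
--         square[0][i] = i + 1
--
--     for row in range(1, n):
--         for col in range(n):
--             square[row][col] = square[row - 1][(col + 1) % n]
--
--     return square
-- ===== SOURCE B (Python) =====
-- def make_latin_square(n):
--     return [[(r + c) % n + 1 for c in range(n)] for r in range(n)]
-- ===== Notes on version B (the rewrite author's own statement) =====
-- stated objective: simpler
-- what changed: Replaces the two-phase build (seed row 0, then derive each row from the previous via a cyclic shift) with a closed-form fill where each cell (r,c) is computed independently as (r+c)%n+1.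
import Mathlib
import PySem

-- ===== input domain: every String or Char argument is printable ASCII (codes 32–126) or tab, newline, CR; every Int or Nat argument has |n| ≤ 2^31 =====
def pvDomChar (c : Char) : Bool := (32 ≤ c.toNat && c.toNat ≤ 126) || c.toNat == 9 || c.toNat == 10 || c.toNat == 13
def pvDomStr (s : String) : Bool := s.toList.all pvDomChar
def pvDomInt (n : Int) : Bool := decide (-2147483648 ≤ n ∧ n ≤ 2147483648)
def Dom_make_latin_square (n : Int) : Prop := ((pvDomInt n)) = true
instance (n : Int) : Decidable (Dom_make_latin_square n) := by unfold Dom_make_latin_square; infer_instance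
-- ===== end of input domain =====

-- B replaces A's row-to-row derivation (each row a cyclic shift of the previous row) with an
-- independent closed-form fill of each cell; same return value, simpler structure.

-- ===== PORT A =====
-- literal transliteration of A: build zero matrix, fill row 0, then derive each row from the previous
def make_latin_square (n : Int) : List (List Int) :=
  let square := (PySem.List.pyRange 0 n 1).map
    (fun _ => (PySem.List.pyRange 0 n 1).map (fun _ => (0 : Int)))
  -- for i in range(n): square[0][i] = i + 1
  let square := (PySem.List.pyRange 0 n 1).foldl
    (fun sq i => sq.set 0 ((sq.getD 0 []).set i.toNat (i + 1))) square
  -- for row in range(1, n): for col in range(n): square[row][col] = square[row-1][(col+1) % n]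
  let square := (PySem.List.pyRange 1 n 1).foldl
    (fun sq row =>
      (PySem.List.pyRange 0 n 1).foldl
        (fun sq col =>
          sq.set row.toNat
            ((sq.getD row.toNat []).set col.toNat
              ((sq.getD (row - 1).toNat []).getD (PySem.Int.mod (col + 1) n).toNat 0)))
        sq)
    square
  square

-- ===== PORT B =====
-- literal transliteration of B: [[(r + c) % n + 1 for c in range(n)] for r in range(n)]
def make_latin_square_alt (n : Int) : List (List Int) :=
  (PySem.List.pyRange 0 n 1).map
    (fun r => (PySem.List.pyRange 0 n 1).map (fun c => PySem.Int.mod (r + c) n + 1))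

-- ===== PRECONDITION & SPEC =====
def Spec_make_latin_square (n : Int) (out : List (List Int)) : Prop := out = make_latin_square_alt n
instance (n : Int) (out : List (List Int)) : Decidable (Spec_make_latin_square n out) := by unfold Spec_make_latin_square; infer_instance

-- ===== CLAIM (what is proved, stated in full; the proofs are below) =====
def Claim_equal_make_latin_square : Prop := ∀ (n : Int), Dom_make_latin_square n → Spec_make_latin_square n (make_latin_square n)

-- ===== LEMMAS AND PROOFS =====

theorem pv_getD_set {α : Type} (l : List α) (k : Nat) (v d : α) (j : Nat) :
    (l.set k v).getD j d = if j = k ∧ k < l.length then v else l.getD j d := by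
  simp [List.getD_eq_getElem?_getD, List.getElem?_set]
  split_ifs with h1 h2 h3 <;> try omega
  all_goals simp_all

theorem pv_getD_eq_getElem {α : Type} (l : List α) (d : α) (j : Nat) (h : j < l.length) :
    l.getD j d = l[j] := by
  simp [List.getD_eq_getElem?_getD, List.getElem?_eq_getElem h]

theorem pv_ext {α : Type} (d : α) (l₁ l₂ : List α) (hlen : l₁.length = l₂.length)
    (h : ∀ j : Nat, j < l₁.length → l₁.getD j d = l₂.getD j d) : l₁ = l₂ := by
  apply List.ext_getElem hlen
  intro j h1 h2
  have := h j h1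
  rwa [pv_getD_eq_getElem _ _ _ h1, pv_getD_eq_getElem _ _ _ h2] at this

-- a fold that only rewrites row k, reading rows k' ≠ k and k, commutes with List.set
theorem pv_foldl_set_row (l : List Int) (k k' : Nat) (hkk' : k' ≠ k)
    (g : List Int → List Int → Int → List Int) :
    ∀ (sq : List (List Int)), k < sq.length →
    l.foldl (fun s i => s.set k (g (s.getD k' []) (s.getD k []) i)) sq
      = sq.set k (l.foldl (g (sq.getD k' [])) (sq.getD k [])) := by
  induction l with
  | nil =>
    intro sq hk
    simp [List.getD_eq_getElem?_getD, List.getElem?_eq_getElem hk]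
  | cons a t ih =>
    intro sq hk
    simp only [List.foldl_cons]
    rw [ih _ (by simpa using hk)]
    rw [pv_getD_set, pv_getD_set]
    simp [hkk', hk, List.set_set]

theorem pv_fill_length (f : Int → Int) (l : List Int) :
    ∀ (row : List Int), (l.foldl (fun r i => r.set i.toNat (f i)) row).length = row.length := by
  induction l with
  | nil => intro row; simp
  | cons a t ih => intro row; simp [ih]

theorem pv_fill_getD_aux (f : Int → Int) (n : Int) :
    ∀ (fuel : Nat) (a : Int), (n - a).toNat = fuel → 0 ≤ a →
    ∀ (row : List Int) (j : Nat),
    ((PySem.List.pyRange a n 1).foldl (fun r i => r.set i.toNat (f i)) row).getD j 0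
      = if a ≤ (j : Int) ∧ (j : Int) < n ∧ j < row.length then f j else row.getD j 0 := by
  intro fuel
  induction fuel with
  | zero =>
    intro a hfuel ha row j
    rw [PySem.List.pyRange_one_eq_nil (by omega)]
    simp only [List.foldl_nil]
    rw [if_neg (by omega)]
  | succ m ih =>
    intro a hfuel ha row j
    rw [PySem.List.pyRange_one_cons (by omega)]
    simp only [List.foldl_cons]
    rw [ih (a + 1) (by omega) (by omega)]
    rw [pv_getD_set]
    simp only [List.length_set]
    by_cases h1 : (a + 1) ≤ (j : Int) ∧ (j : Int) < n ∧ j < row.length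
    · rw [if_pos h1, if_pos (by omega)]
    · rw [if_neg h1]
      by_cases h2 : j = a.toNat ∧ a.toNat < row.length
      · rw [if_pos h2, if_pos (by omega)]
        congr 1
        omega
      · rw [if_neg h2, if_neg (by omega)]

-- filling positions a..n-1 of a row with f
theorem pv_fill_getD (f : Int → Int) (n a : Int) (ha : 0 ≤ a)
    (row : List Int) (j : Nat) :
    ((PySem.List.pyRange a n 1).foldl (fun r i => r.set i.toNat (f i)) row).getD j 0
      = if a ≤ (j : Int) ∧ (j : Int) < n ∧ j < row.length then f j else row.getD j 0 :=
  pv_fill_getD_aux f n (n - a).toNat a rfl ha row j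

-- the target row r of the closed-form square
def pvRow (n r : Int) : List Int :=
  (PySem.List.pyRange 0 n 1).map (fun c => PySem.Int.mod (r + c) n + 1)

theorem pv_row_length (n r : Int) : (pvRow n r).length = n.toNat := by
  simp [pvRow, PySem.List.length_pyRange_one]

theorem pv_row_getD (n r : Int) (j : Nat) (hj : (j : Int) < n) :
    (pvRow n r).getD j 0 = PySem.Int.mod (r + j) n + 1 := by
  have hlen : j < (pvRow n r).length := by rw [pv_row_length]; omega
  rw [pv_getD_eq_getElem _ _ _ hlen]
  simp only [pvRow, List.getElem_map]
  rw [PySem.List.getElem_pyRange_one]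
  norm_num

theorem pv_mod_shift (n r j : Int) : PySem.Int.mod (r - 1 + PySem.Int.mod (j + 1) n) n
    = PySem.Int.mod (r + j) n ∨ n ≤ 0 := by
  by_cases h : 0 < n
  case neg => exact Or.inr (by omega)
  case pos =>
    left
    simp only [PySem.Int.mod_eq_emod_of_pos h]
    conv_lhs => rw [Int.add_emod]
    conv_rhs => rw [show r + j = (r - 1) + (j + 1) by ring, Int.add_emod]
    rw [Int.emod_emod_of_dvd _ dvd_rfl]

-- the inner fold preserves the outer length
theorem pv_inner_length (n : Int) (row : Int) (l : List Int) :
    ∀ (sq : List (List Int)),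
    (l.foldl
      (fun sq col =>
        sq.set row.toNat
          ((sq.getD row.toNat []).set col.toNat
            ((sq.getD (row - 1).toNat []).getD (PySem.Int.mod (col + 1) n).toNat 0)))
      sq).length = sq.length := by
  induction l with
  | nil => intro sq; simp
  | cons a t ih => intro sq; rw [List.foldl_cons, ih, List.length_set]

theorem pv_outer_length (n : Int) (l : List Int) :
    ∀ (sq : List (List Int)),
    (l.foldl
      (fun sq row =>
        (PySem.List.pyRange 0 n 1).foldl
          (fun sq col =>
            sq.set row.toNat
              ((sq.getD row.toNat []).set col.toNat
                ((sq.getD (row - 1).toNat []).getD (PySem.Int.mod (col + 1) n).toNat 0)))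
          sq)
      sq).length = sq.length := by
  induction l with
  | nil => intro sq; simp
  | cons a t ih => intro sq; rw [List.foldl_cons, ih, pv_inner_length]

-- one outer-loop step: row r derived from row r-1 = pvRow n (r-1) is pvRow n r
theorem pv_step (n r : Int) (hn : 0 < n) (hr : 1 ≤ r) (hrn : r < n)
    (sq : List (List Int)) (hlen : sq.length = n.toNat)
    (hrowlen : (sq.getD r.toNat []).length = n.toNat)
    (hprev : sq.getD (r - 1).toNat [] = pvRow n (r - 1)) :
    (PySem.List.pyRange 0 n 1).foldl
      (fun sq col =>
        sq.set r.toNat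
          ((sq.getD r.toNat []).set col.toNat
            ((sq.getD (r - 1).toNat []).getD (PySem.Int.mod (col + 1) n).toNat 0)))
      sq = sq.set r.toNat (pvRow n r) := by
  rw [pv_foldl_set_row (PySem.List.pyRange 0 n 1) r.toNat (r - 1).toNat (by omega)
        (fun prev cur i => cur.set i.toNat (prev.getD (PySem.Int.mod (i + 1) n).toNat 0))
        sq (by omega)]
  congr 1
  rw [hprev]
  apply pv_ext 0
  · rw [pv_fill_length, hrowlen, pv_row_length]
  · intro j hj
    rw [pv_fill_length, hrowlen] at hj
    have hmodnn : 0 ≤ PySem.Int.mod ((j : Int) + 1) n := PySem.Int.mod_nonneg _ hn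
    have hmodlt : PySem.Int.mod ((j : Int) + 1) n < n := PySem.Int.mod_lt _ hn
    rw [pv_fill_getD _ _ _ le_rfl, if_pos ⟨by omega, by omega, by rw [hrowlen]; omega⟩]
    rw [pv_row_getD n (r - 1) _ (by omega)]
    rw [pv_row_getD n r j (by omega)]
    have hcast : ((PySem.Int.mod ((j : Int) + 1) n).toNat : Int) = PySem.Int.mod ((j : Int) + 1) n := by omega
    rw [hcast]
    rcases pv_mod_shift n r (j : Int) with h | h
    · rw [h]
    · omega

-- outer loop invariant: after processing rows r..n-1, all rows from r on equal pvRow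
theorem pv_outer (n : Int) (hn : 0 < n) :
    ∀ (fuel : Nat) (r : Int), (n - r).toNat = fuel → 1 ≤ r → r ≤ n →
    ∀ (sq : List (List Int)), sq.length = n.toNat →
    (∀ j : Nat, j < n.toNat → (sq.getD j []).length = n.toNat) →
    sq.getD (r - 1).toNat [] = pvRow n (r - 1) →
    ∀ j : Nat, j < n.toNat →
    ((PySem.List.pyRange r n 1).foldl
      (fun sq row =>
        (PySem.List.pyRange 0 n 1).foldl
          (fun sq col =>
            sq.set row.toNat
              ((sq.getD row.toNat []).set col.toNat
                ((sq.getD (row - 1).toNat []).getD (PySem.Int.mod (col + 1) n).toNat 0)))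
          sq)
      sq).getD j []
      = if (j : Int) < r then sq.getD j [] else pvRow n j := by
  intro fuel
  induction fuel with
  | zero =>
    intro r hfuel hr hrn sq hlen hrows hprev j hj
    rw [PySem.List.pyRange_one_eq_nil (show n ≤ r by omega)]
    simp only [List.foldl_nil]
    rw [if_pos (by omega)]
  | succ m ih =>
    intro r hfuel hr hrn sq hlen hrows hprev j hj
    have hrltn : r < n := by omega
    rw [PySem.List.pyRange_one_cons (show r < n by omega)]
    simp only [List.foldl_cons]
    rw [pv_step n r hn hr hrltn sq hlen (hrows r.toNat (by omega)) hprev]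
    rw [ih (r + 1) (by omega) (by omega) (by omega) _
          (by rw [List.length_set]; exact hlen)
          (by
            intro j' hj'
            rw [pv_getD_set]
            split_ifs with h
            · rw [pv_row_length]
            · exact hrows j' hj')
          (by
            have : (r + 1 - 1).toNat = r.toNat := by omega
            rw [this, pv_getD_set, if_pos ⟨rfl, by omega⟩]
            congr 1
            omega)
          j hj]
    rw [pv_getD_set]
    by_cases h1 : (j : Int) < r
    · rw [if_pos (by omega), if_pos h1, if_neg (by omega)]
    · by_cases h2 : (j : Int) < r + 1
      · rw [if_pos h2, if_pos ⟨by omega, by omega⟩, if_neg (by omega)]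
        congr 1
        omega
      · rw [if_neg h2, if_neg (by omega)]

-- row 0 as produced by phase 1 is pvRow n 0
theorem pv_row0 (n : Int) (hn : 0 < n) :
    (PySem.List.pyRange 0 n 1).foldl (fun r i => r.set i.toNat (i + 1))
      ((PySem.List.pyRange 0 n 1).map (fun _ => (0 : Int))) = pvRow n 0 := by
  apply pv_ext 0
  · rw [pv_fill_length, pv_row_length]
    simp [PySem.List.length_pyRange_one]
  · intro j hj
    rw [pv_fill_length] at hj
    simp only [List.length_map, PySem.List.length_pyRange_one] at hj
    rw [pv_fill_getD _ _ _ le_rfl,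
        if_pos ⟨by omega, by omega, by simp [PySem.List.length_pyRange_one]; omega⟩]
    rw [pv_row_getD _ _ _ (by omega)]
    rw [PySem.Int.mod_eq_emod_of_pos hn, Int.zero_add,
        Int.emod_eq_of_lt (by omega) (by omega)]

theorem pv_square0_getD (n : Int) (j : Nat) (hj : j < n.toNat) :
    (((PySem.List.pyRange 0 n 1).map
        (fun _ => (PySem.List.pyRange 0 n 1).map (fun _ => (0 : Int)))).getD j [])
      = (PySem.List.pyRange 0 n 1).map (fun _ => (0 : Int)) := by
  have hlen : j < ((PySem.List.pyRange 0 n 1).map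
      (fun _ => (PySem.List.pyRange 0 n 1).map (fun _ => (0 : Int)))).length := by
    simp [PySem.List.length_pyRange_one]; omega
  rw [pv_getD_eq_getElem _ _ _ hlen, List.getElem_map]

theorem pv_alt_getD (n : Int) (j : Nat) (hj : j < n.toNat) :
    (make_latin_square_alt n).getD j [] = pvRow n (0 + (j : Int)) := by
  have hlen : j < (make_latin_square_alt n).length := by
    simp [make_latin_square_alt, PySem.List.length_pyRange_one]; omega
  rw [pv_getD_eq_getElem _ _ _ hlen]
  simp only [make_latin_square_alt, List.getElem_map]
  rw [PySem.List.getElem_pyRange_one]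
  rfl

-- ===== VERDICT (by name: the statement is the Claim_ definition above) =====
theorem make_latin_square_spec : Claim_equal_make_latin_square := by
  intro n _
  unfold Spec_make_latin_square
  by_cases hn : 0 < n
  case neg =>
    simp only [make_latin_square, make_latin_square_alt]
    rw [PySem.List.pyRange_one_eq_nil (show n ≤ (0 : Int) by omega),
        PySem.List.pyRange_one_eq_nil (show n ≤ (1 : Int) by omega)]
    rfl
  case pos =>
    simp only [make_latin_square]
    rw [pv_foldl_set_row (PySem.List.pyRange 0 n 1) 0 1 (by omega)
          (fun _ cur i => cur.set i.toNat (i + 1)) _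
          (by simp [PySem.List.length_pyRange_one]; omega)]
    rw [pv_square0_getD n 0 (by omega), pv_row0 n hn]
    apply pv_ext []
    · rw [pv_outer_length, List.length_set, make_latin_square_alt]
      simp [PySem.List.length_pyRange_one]
    · intro j hj
      rw [pv_outer_length, List.length_set] at hj
      simp only [List.length_map, PySem.List.length_pyRange_one] at hj
      rw [pv_outer n hn (n - 1).toNat 1 rfl le_rfl (by omega) _
            (by rw [List.length_set]; simp [PySem.List.length_pyRange_one])
            (by
              intro j' hj'
              rw [pv_getD_set]
              split_ifs with h
              · rw [pv_row_length]
              · rw [pv_square0_getD n j' hj']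
                simp [PySem.List.length_pyRange_one])
            (by
              rw [show ((1 : Int) - 1).toNat = 0 from rfl, pv_getD_set,
                  if_pos ⟨rfl, by simp [PySem.List.length_pyRange_one]; omega⟩]
              rfl)
            j (by omega)]
      rw [pv_alt_getD n j (by omega)]
      by_cases h : (j : Int) < 1
      · rw [if_pos h, pv_getD_set,
            if_pos ⟨by omega, by simp [PySem.List.length_pyRange_one]; omega⟩]
        congr 1
        omega
      · rw [if_neg h]
        congr 1
        omega
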